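-- pv_equiv track=rewrite | github.com/TensorGreed/__SLM__ | backend/app/services/export_service.py | _resolve_metric_source
-- ===== SOURCE A (Python) =====
-- def _resolve_metric_source(metric_sources: dict[str, str]) -> str:
--     normalized = {
--         str(value or "").strip().lower()
--         for value in metric_sources.values()
--         if str(value or "").strip()
--     }
--     if normalized == {"measured"}:
--         return "measured"
--     if "measured" in normalized:
--         return "mixed"
--     return "estimated"
-- ===== SOURCE B (Python) =====
-- def _resolve_metric_source(metric_sources: dict[str, str]) -> str:
--     norms = [str(v or "").strip().lower() for v in metric_sources.values()]
--     measured = norms.count("measured")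
--     nonempty = sum(1 for n in norms if n)
--     if measured == 0:
--         return "estimated"
--     if measured == nonempty:
--         return "measured"
--     return "mixed"
-- ===== Notes on version B (the rewrite author's own statement) =====
-- stated objective: alternative
-- what changed: Replaces A's normalized set with set-equality/membership tests by a counting formulation: count occurrences of 'measured' and of non-empty normalized values, then decide by arithmetic comparison (0 < measured, measured == nonempty) instead of set operations.
import Mathlib
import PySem

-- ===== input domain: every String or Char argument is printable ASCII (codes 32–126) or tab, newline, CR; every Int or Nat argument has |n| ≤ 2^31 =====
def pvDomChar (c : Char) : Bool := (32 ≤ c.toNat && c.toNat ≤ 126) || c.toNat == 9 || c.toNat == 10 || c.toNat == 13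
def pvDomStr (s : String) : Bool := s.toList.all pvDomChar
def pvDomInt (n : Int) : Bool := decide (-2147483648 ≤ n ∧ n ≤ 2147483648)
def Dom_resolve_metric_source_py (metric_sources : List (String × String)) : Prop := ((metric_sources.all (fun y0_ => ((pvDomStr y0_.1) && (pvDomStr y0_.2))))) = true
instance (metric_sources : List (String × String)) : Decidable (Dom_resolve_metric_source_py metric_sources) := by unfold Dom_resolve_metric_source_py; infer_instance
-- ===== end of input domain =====

-- B replaces A's set construction and set-equality/membership tests by counting: count of
-- "measured" and count of non-empty normalized values, decided by arithmetic comparison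
-- (objective: alternative).
-- ===== PORT A =====
def resolve_metric_source_py (metric_sources : List (String × String)) : String :=
  let vals := (PySem.Dict.ofList metric_sources).values
  let normalized : PySem.Set String :=
    vals.foldl (fun s v =>
      if PySem.Str.strip v ≠ "" then
        PySem.Set.add s (PySem.Str.lower (PySem.Str.strip v))
      else s) []
  if PySem.Set.equal normalized ["measured"] then "measured"
  else if "measured" ∈ normalized then "mixed"
  else "estimated"

-- ===== PORT B =====
def resolve_metric_source_py_alt (metric_sources : List (String × String)) : String :=
  let vals := (PySem.Dict.ofList metric_sources).values
  let norms := vals.map (fun v => PySem.Str.lower (PySem.Str.strip v))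
  let measured := norms.count "measured"
  let nonempty := norms.countP (fun n => n ≠ "")
  if measured = 0 then "estimated"
  else if measured = nonempty then "measured"
  else "mixed"

-- ===== PRECONDITION & SPEC =====
def Spec_resolve_metric_source_py (metric_sources : List (String × String)) (out : String) : Prop := out = resolve_metric_source_py_alt metric_sources
instance (metric_sources : List (String × String)) (out : String) : Decidable (Spec_resolve_metric_source_py metric_sources out) := by unfold Spec_resolve_metric_source_py; infer_instance

-- ===== CLAIM (what is proved, stated in full; the proofs are below) =====
def Claim_equal_resolve_metric_source_py : Prop := ∀ (metric_sources : List (String × String)), Dom_resolve_metric_source_py metric_sources → Spec_resolve_metric_source_py metric_sources (resolve_metric_source_py metric_sources)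

-- ===== LEMMAS AND PROOFS =====
lemma pv_lower_eq_empty (t : String) : PySem.Str.lower t = "" ↔ t = "" := by
  constructor
  · intro h
    have h2 := congrArg String.toList h
    simp [PySem.Chars.lower] at h2
    exact h2
  · intro h; subst h; rfl

-- characterization of the members of A's accumulated set
lemma pv_mem_fold (vals : List String) (s : List String) (x : String) :
    x ∈ vals.foldl (fun s v =>
      if PySem.Str.strip v ≠ "" then
        PySem.Set.add s (PySem.Str.lower (PySem.Str.strip v))
      else s) s ↔
    x ∈ s ∨ ∃ v ∈ vals, PySem.Str.strip v ≠ "" ∧ PySem.Str.lower (PySem.Str.strip v) = x := by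
  induction vals generalizing s with
  | nil => simp
  | cons v vs ih =>
    simp only [List.foldl_cons]
    by_cases hv : PySem.Str.strip v = ""
    · simp only [hv, ne_eq, not_true_eq_false, if_false, ih]
      constructor
      · rintro (h | ⟨w, hw, h1, h2⟩)
        · exact Or.inl h
        · exact Or.inr ⟨w, List.mem_cons_of_mem _ hw, h1, h2⟩
      · rintro (h | ⟨w, hw, h1, h2⟩)
        · exact Or.inl h
        · rcases List.mem_cons.mp hw with rfl | hw
          · exact absurd hv h1
          · exact Or.inr ⟨w, hw, h1, h2⟩
    · simp only [ne_eq, hv, not_false_eq_true, if_true, ih, PySem.Set.mem_add]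
      constructor
      · rintro ((h | rfl) | ⟨w, hw, h1, h2⟩)
        · exact Or.inl h
        · exact Or.inr ⟨v, List.mem_cons_self, hv, rfl⟩
        · exact Or.inr ⟨w, List.mem_cons_of_mem _ hw, h1, h2⟩
      · rintro (h | ⟨w, hw, h1, h2⟩)
        · exact Or.inl (Or.inl h)
        · rcases List.mem_cons.mp hw with rfl | hw
          · exact Or.inl (Or.inr h2.symm)
          · exact Or.inr ⟨w, hw, h1, h2⟩

-- counts: "measured" count ≤ non-empty count, with equality iff no non-empty non-"measured" element
lemma pv_count_le_and_eq (l : List String) :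
    l.count "measured" ≤ l.countP (fun n => n ≠ "") ∧
    (l.count "measured" = l.countP (fun n => n ≠ "") ↔ ∀ n ∈ l, n ≠ "" → n = "measured") := by
  induction l with
  | nil => simp
  | cons a l ih =>
    obtain ⟨hle, heq⟩ := ih
    rw [List.countP_cons, List.forall_mem_cons]
    by_cases ha : a = "measured"
    · subst ha
      rw [List.count_cons_self]
      have h2 : (decide (("measured" : String) ≠ "")) = true := by decide
      rw [h2, if_pos rfl]
      refine ⟨by omega, ?_⟩
      constructor
      · intro h; exact ⟨fun _ => rfl, heq.mp (by omega)⟩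
      · intro h; rw [heq.mpr h.2]
    · have hc : (a :: l).count "measured" = l.count "measured" := by
        simp [ha]
      rw [hc]
      by_cases he : a = ""
      · subst he
        have h2 : (decide (("" : String) ≠ "")) = false := by decide
        rw [h2]
        simp only [Bool.false_eq_true, if_false, Nat.add_zero]
        refine ⟨hle, ?_⟩
        constructor
        · intro h; exact ⟨fun c => absurd rfl c, heq.mp h⟩
        · intro h; exact heq.mpr h.2
      · have h2 : (decide (a ≠ "")) = true := by simp [he]
        rw [h2, if_pos rfl]
        refine ⟨by omega, ?_⟩
        constructor
        · intro h; omega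
        · intro h; exact absurd (h.1 he) ha

-- count "measured" positive iff some value normalizes to "measured"
lemma pv_count_pos (l : List String) :
    0 < (l.map (fun v => PySem.Str.lower (PySem.Str.strip v))).count "measured" ↔
    ∃ v ∈ l, PySem.Str.lower (PySem.Str.strip v) = "measured" := by
  rw [List.count_pos_iff]
  simp

-- ===== VERDICT (by name: the statement is the Claim_ definition above) =====
theorem resolve_metric_source_py_spec : Claim_equal_resolve_metric_source_py := by
  intro ms _
  unfold Spec_resolve_metric_source_py
  simp only [resolve_metric_source_py, resolve_metric_source_py_alt]
  set vals := (PySem.Dict.ofList ms).values with hv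
  set S := vals.foldl (fun s v =>
      if PySem.Str.strip v ≠ "" then
        PySem.Set.add s (PySem.Str.lower (PySem.Str.strip v))
      else s) ([] : List String) with hS
  set norms := vals.map (fun v => PySem.Str.lower (PySem.Str.strip v)) with hn
  have hmemS : ∀ x, x ∈ S ↔ ∃ v ∈ vals, PySem.Str.strip v ≠ "" ∧ PySem.Str.lower (PySem.Str.strip v) = x := by
    intro x; rw [hS, pv_mem_fold]; simp
  have hmeas : "measured" ∈ S ↔ 0 < norms.count "measured" := by
    rw [hmemS, hn, pv_count_pos]
    constructor
    · rintro ⟨v, h1, _, h2⟩; exact ⟨v, h1, h2⟩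
    · rintro ⟨v, h1, h2⟩
      refine ⟨v, h1, ?_, h2⟩
      intro he
      rw [he] at h2
      exact absurd h2 (by decide)
  obtain ⟨hle, heq⟩ := pv_count_le_and_eq norms
  by_cases h0 : norms.count "measured" = 0
  · -- no "measured": A's set does not contain it, not equal {"measured"}
    have hnm' : "measured" ∉ S := fun h => by have := hmeas.mp h; omega
    have hne : ¬ PySem.Set.equal S ["measured"] = true := by
      rw [PySem.Set.equal_iff]
      intro hall
      exact hnm' ((hall "measured").mpr (by simp))
    rw [if_neg hne, if_neg hnm', if_pos h0]
  · have hpos : 0 < norms.count "measured" := Nat.pos_of_ne_zero h0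
    have hin : "measured" ∈ S := hmeas.mpr hpos
    by_cases hall : norms.count "measured" = norms.countP (fun n => n ≠ "")
    · -- all non-empty normalized values are "measured": set equality holds
      have honly : ∀ n ∈ norms, n ≠ "" → n = "measured" := heq.mp hall
      have he : PySem.Set.equal S ["measured"] = true := by
        rw [PySem.Set.equal_iff]
        intro x
        constructor
        · intro hx
          obtain ⟨v, hv1, hv2, hv3⟩ := (hmemS x).mp hx
          have hxne : x ≠ "" := by
            intro hx0
            rw [hx0] at hv3
            exact hv2 ((pv_lower_eq_empty _).mp hv3)
          have : x = "measured" := honly x (by rw [hn]; exact List.mem_map.mpr ⟨v, hv1, hv3⟩) hxne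
          simp [this]
        · intro hx
          simp at hx
          exact hx ▸ hin
      rw [if_pos he, if_neg h0, if_pos hall]
    · -- some non-empty non-"measured" value exists: not equal, but "measured" ∈ set
      have hne : ¬ PySem.Set.equal S ["measured"] = true := by
        rw [PySem.Set.equal_iff]
        intro hallx
        apply hall
        apply heq.mpr
        intro n hn' hne'
        obtain ⟨v, hv1, hv2⟩ := List.mem_map.mp (hn ▸ hn')
        have hsv : PySem.Str.strip v ≠ "" := by
          intro h
          apply hne'
          rw [← hv2, h]
          rfl
        have : n ∈ S := (hmemS n).mpr ⟨v, hv1, hsv, hv2⟩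
        have := (hallx n).mp this
        simpa using this
      rw [if_neg hne, if_pos hin, if_neg h0, if_neg hall]
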